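-- pv_equiv track=rewrite | github.com/HengXin666/HX-Music | pyTool/del/ds_ass.py | splitPreservingTags
-- ===== SOURCE A (Python) =====
-- from typing import List, Tuple, Dict, Optional
--
-- def splitPreservingTags(text: str) -> List[Tuple[str, bool]]:
--     """
--     返回 [(segment, isTag)].
--     isTag=True 表示该段是完整的大括号标签 (包含两侧的 { }).
--     """
--     out: List[Tuple[str, bool]] = []
--     i = 0
--     n = len(text)
--     while i < n:
--         if text[i] == '{':
--             j = text.find('}', i+1)
--             if j == -1:
--                 out.append((text[i:], False))
--                 break
--             out.append((text[i:j+1], True))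
--             i = j + 1
--         else:
--             j = text.find('{', i)
--             if j == -1:
--                 out.append((text[i:], False))
--                 break
--             out.append((text[i:j], False))
--             i = j
--     return out
-- ===== SOURCE B (Python) =====
-- import re
--
-- _TOKEN = re.compile(r'\{[^}]*\}|[^{]+|\{[\s\S]*')
--
-- def splitPreservingTags(text: str):
--     return [(t, t.startswith('{') and t.endswith('}'))
--             for t in _TOKEN.findall(text)]
-- ===== Notes on version B (the rewrite author's own statement) =====
-- stated objective: idiomatic
-- what changed: A's hand-rolled while-loop with index arithmetic and str.find is replaced by a compiled regex tokenizer (re.findall over one ordered alternation: complete tag | run of non-'{' | unclosed '{'-to-end) followed by a uniform startswith/endswith labelling pass.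
import Mathlib
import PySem

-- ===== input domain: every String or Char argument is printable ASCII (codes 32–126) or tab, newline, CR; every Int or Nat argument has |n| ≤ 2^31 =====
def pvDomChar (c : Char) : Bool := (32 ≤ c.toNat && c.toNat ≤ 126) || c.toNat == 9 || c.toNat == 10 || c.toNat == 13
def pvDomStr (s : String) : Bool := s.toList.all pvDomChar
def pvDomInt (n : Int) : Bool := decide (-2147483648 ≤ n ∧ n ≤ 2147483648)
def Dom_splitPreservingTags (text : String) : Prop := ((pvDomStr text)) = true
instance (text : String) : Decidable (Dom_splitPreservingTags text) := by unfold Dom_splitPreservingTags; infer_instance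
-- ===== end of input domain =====

-- B replaces A's index/while scan with a regex tokenizer (one ordered alternation,
-- re.findall) plus a uniform startswith/endswith labelling pass (objective: idiomatic).

-- ===== PORT A =====
-- `breakAtA ch l` models Python `l.find(ch)`: `some (pre, post)` splits l at the FIRST
-- occurrence of ch (l = pre ++ ch :: post); `none` = find returned -1.
def breakAtA (ch : Char) : List Char → Option (List Char × List Char)
  | [] => none
  | c :: cs =>
    if c = ch then some ([], cs)
    else (breakAtA ch cs).map (fun pq => (c :: pq.1, pq.2))

-- termination measure for goA's `i = j + 1` / `i = j` jumps
theorem breakAtA_snd_lt (ch : Char) (l pre post : List Char)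
    (h : breakAtA ch l = some (pre, post)) : post.length < l.length := by
  induction l generalizing pre post with
  | nil => simp [breakAtA] at h
  | cons c cs ih =>
    rw [breakAtA] at h
    split_ifs at h with hc
    · simp only [Option.some.injEq, Prod.mk.injEq] at h
      obtain ⟨-, h2⟩ := h
      subst h2; simp
    · rw [Option.map_eq_some_iff] at h
      obtain ⟨⟨p, q⟩, hq, hpq⟩ := h
      simp only [Prod.mk.injEq] at hpq
      obtain ⟨-, h2⟩ := hpq
      subst h2
      have := ih p q hq
      simp; omega

-- A's while loop, as structural recursion on the unprocessed suffix text[i:].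
def goA : List Char → List (String × Bool)
  | [] => []
  | c :: rest =>
    if c = '{' then
      -- j = text.find('}', i+1)
      match h : breakAtA '}' rest with
      | none => [(String.ofList (c :: rest), false)]                  -- j == -1: tail, break
      | some (pre, post) =>
        (String.ofList ('{' :: pre ++ ['}']), true) :: goA post       -- text[i:j+1]; i = j+1
    else
      -- j = text.find('{', i)
      let pre := (c :: rest).takeWhile (· ≠ '{')
      let post := (c :: rest).dropWhile (· ≠ '{')
      if post = [] then [(String.ofList (c :: rest), false)]          -- j == -1: tail, break
      else (String.ofList pre, false) :: goA post                     -- text[i:j]; i = j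
termination_by l => l.length
decreasing_by
  · have := breakAtA_snd_lt '}' rest pre post h
    simp; omega
  · rename_i hc _
    rw [List.dropWhile_cons_of_pos (by simp [hc])]
    have := List.length_dropWhile_le (fun x => !decide (x = '{')) rest
    simp at this ⊢; omega

def splitPreservingTags (text : String) : List (String × Bool) := goA text.toList

-- ===== PORT B =====
-- The three alternatives of the regex r'\{[^}]*\}|[^{]+|\{[\s\S]*', tried in order at the
-- current position — exactly the ordered-alternation semantics of Python's re engine.
-- alternative 1:  \{[^}]*\}  — a complete brace tag
def tryTag : List Char → Option (List Char × List Char)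
  | [] => none
  | c :: cs =>
    if c = '{' then (breakAtA '}' cs).map (fun pq => ('{' :: pq.1 ++ ['}'], pq.2))
    else none

-- alternative 2:  [^{]+  — a maximal nonempty run of non-'{' characters
def tryRun (s : List Char) : Option (List Char × List Char) :=
  let p := s.takeWhile (· ≠ '{')
  if p = [] then none else some (p, s.dropWhile (· ≠ '{'))

-- alternative 3:  \{[\s\S]*  — an unclosed '{' and everything to the end
def tryUnclosed : List Char → Option (List Char × List Char)
  | [] => none
  | c :: cs => if c = '{' then some (c :: cs, []) else none

def matchToken (s : List Char) : Option (List Char × List Char) :=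
  (tryTag s).orElse (fun _ => (tryRun s).orElse (fun _ => tryUnclosed s))

-- every token is nonempty, so findall consumes the string
theorem matchToken_rest_lt (s t r : List Char) (h : matchToken s = some (t, r)) :
    r.length < s.length := by
  match s with
  | [] => simp [matchToken, tryTag, tryRun, tryUnclosed, Option.orElse] at h
  | c :: cs =>
    by_cases hc : c = '{'
    · subst hc
      cases hb : breakAtA '}' cs with
      | none =>
        simp [matchToken, tryTag, tryRun, tryUnclosed, hb, Option.orElse] at h
        obtain ⟨-, h2⟩ := h
        simp [h2]
      | some pq =>
        have hlt := breakAtA_snd_lt '}' cs pq.1 pq.2 (by simpa using hb)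
        simp [matchToken, tryTag, hb, Option.orElse] at h
        obtain ⟨-, h2⟩ := h
        simp [← h2]; omega
    · simp [matchToken, tryTag, tryRun, tryUnclosed, hc, Option.orElse] at h
      obtain ⟨-, h2⟩ := h
      rw [← h2]
      have := List.length_dropWhile_le (fun x => !decide (x = '{')) cs
      simp at this ⊢; omega

-- _TOKEN.findall(text): repeatedly take the leftmost token.
def tokensB (s : List Char) : List (List Char) :=
  match h : matchToken s with
  | none => []
  | some (t, r) => t :: tokensB r
termination_by s.length
decreasing_by exact matchToken_rest_lt s t r h

-- t.startswith('{') and t.endswith('}')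
def labelB (t : List Char) : Bool :=
  (t.head? = some '{') && (t.getLast? = some '}')

def splitPreservingTags_alt (text : String) : List (String × Bool) :=
  (tokensB text.toList).map (fun t => (String.ofList t, labelB t))

-- ===== PRECONDITION & SPEC =====
def Spec_splitPreservingTags (text : String) (out : List (String × Bool)) : Prop := out = splitPreservingTags_alt text
instance (text : String) (out : List (String × Bool)) : Decidable (Spec_splitPreservingTags text out) := by unfold Spec_splitPreservingTags; infer_instance

-- ===== CLAIM (what is proved, stated in full; the proofs are below) =====
def Claim_equal_splitPreservingTags : Prop := ∀ (text : String), Dom_splitPreservingTags text → Spec_splitPreservingTags text (splitPreservingTags text)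

-- ===== LEMMAS AND PROOFS =====

theorem breakAtA_none_not_mem (ch : Char) (l : List Char) (h : breakAtA ch l = none) :
    ch ∉ l := by
  induction l with
  | nil => simp
  | cons c cs ih =>
    rw [breakAtA] at h
    split_ifs at h with hc
    cases hb : breakAtA ch cs with
    | some pq => rw [hb] at h; simp at h
    | none =>
      simp [ih hb]
      exact fun e => hc e.symm

theorem tokensB_none (s : List Char) (hm : matchToken s = none) : tokensB s = [] := by
  rw [tokensB]
  split
  · rfl
  · rename_i t r heq; rw [hm] at heq; cases heq

theorem tokensB_some (s t r : List Char) (hm : matchToken s = some (t, r)) :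
    tokensB s = t :: tokensB r := by
  rw [tokensB]
  split
  · rename_i heq; rw [hm] at heq; cases heq
  · rename_i t' r' heq; rw [hm] at heq; cases heq; rfl

theorem getLast?_ne (l : List Char) (ch : Char) (h : ch ∉ l) :
    l.getLast? ≠ some ch := by
  intro he
  exact h (by simpa using List.mem_of_getLast? he)

theorem goA_nil : goA [] = [] := by rw [goA]

theorem goA_tag (cs pre post : List Char) (hb : breakAtA '}' cs = some (pre, post)) :
    goA ('{' :: cs) = (String.ofList ('{' :: pre ++ ['}']), true) :: goA post := by
  rw [goA, if_pos rfl]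
  split
  · rename_i heq; rw [hb] at heq; cases heq
  · rename_i pre' post' heq
    rw [hb] at heq
    cases heq
    rfl

theorem goA_unclosed (cs : List Char) (hb : breakAtA '}' cs = none) :
    goA ('{' :: cs) = [(String.ofList ('{' :: cs), false)] := by
  rw [goA, if_pos rfl]
  split
  · rfl
  · rename_i pre' post' heq; rw [hb] at heq; cases heq

theorem goA_run_all (c : Char) (cs : List Char) (hc : ¬ c = '{')
    (hpost : (c :: cs).dropWhile (· ≠ '{') = []) :
    goA (c :: cs) = [(String.ofList (c :: cs), false)] := by
  rw [goA, if_neg hc, if_pos hpost]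

theorem goA_run (c : Char) (cs : List Char) (hc : ¬ c = '{')
    (hpost : (c :: cs).dropWhile (· ≠ '{') ≠ []) :
    goA (c :: cs) = (String.ofList ((c :: cs).takeWhile (· ≠ '{')), false) ::
      goA ((c :: cs).dropWhile (· ≠ '{')) := by
  rw [goA, if_neg hc]
  simp only [if_neg hpost]

theorem goA_eq_aux (n : Nat) : ∀ (s : List Char), s.length ≤ n →
    goA s = (tokensB s).map (fun t => (String.ofList t, labelB t)) := by
  induction n with
  | zero =>
    intro s hs
    have : s = [] := List.eq_nil_of_length_eq_zero (Nat.le_zero.mp hs)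
    subst this
    rw [goA_nil, tokensB_none _ (by simp [matchToken, tryTag, tryRun, tryUnclosed, Option.orElse])]
    rfl
  | succ n ih =>
    intro s hs
    match s with
    | [] =>
      rw [goA_nil, tokensB_none _ (by simp [matchToken, tryTag, tryRun, tryUnclosed, Option.orElse])]
      rfl
    | c :: cs =>
      by_cases hc : c = '{'
      · subst hc
        cases hb : breakAtA '}' cs with
        | some pq =>
          obtain ⟨pre, post⟩ := pq
          have hm : matchToken ('{' :: cs) = some ('{' :: pre ++ ['}'], post) := by
            simp [matchToken, tryTag, hb, Option.orElse]
          have hlt := breakAtA_snd_lt '}' cs pre post hb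
          rw [goA_tag cs pre post hb, tokensB_some _ _ _ hm, List.map_cons,
              ih post (by simp at hs; omega)]
          have hlast : ('{' :: (pre ++ ['}'])).getLast? = some '}' := by
            rw [← List.cons_append]; exact List.getLast?_concat
          simp [labelB, hlast]
        | none =>
          have hm : matchToken ('{' :: cs) = some ('{' :: cs, []) := by
            simp [matchToken, tryTag, tryRun, tryUnclosed, hb, Option.orElse]
          have hnm : '}' ∉ ('{' :: cs) := by
            have := breakAtA_none_not_mem '}' cs hb
            simp [this]
          have hlast := getLast?_ne _ _ hnm
          rw [goA_unclosed cs hb, tokensB_some _ _ _ hm,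
              tokensB_none _ (by simp [matchToken, tryTag, tryRun, tryUnclosed, Option.orElse])]
          simp [labelB, hlast]
      · have hp : (c :: cs).takeWhile (· ≠ '{') = c :: cs.takeWhile (· ≠ '{') :=
          List.takeWhile_cons_of_pos (by simp [hc])
        have hm : matchToken (c :: cs) =
            some ((c :: cs).takeWhile (· ≠ '{'), (c :: cs).dropWhile (· ≠ '{')) := by
          simp [matchToken, tryTag, tryRun, tryUnclosed, hc, Option.orElse]
        have hhead : labelB ((c :: cs).takeWhile (· ≠ '{')) = false := by
          simp [labelB, hp, hc]
        by_cases hpost : (c :: cs).dropWhile (· ≠ '{') = []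
        · have hall : (c :: cs).takeWhile (· ≠ '{') = c :: cs := by
            have := List.takeWhile_append_dropWhile (p := (· ≠ '{')) (l := c :: cs)
            rw [hpost] at this; simpa using this
          rw [goA_run_all c cs hc hpost, tokensB_some _ _ _ hm, hpost,
              tokensB_none _ (by simp [matchToken, tryTag, tryRun, tryUnclosed, Option.orElse]),
              hall]
          simp [labelB, hc]
        · have hlt : ((c :: cs).dropWhile (· ≠ '{')).length < (c :: cs).length := by
            rw [List.dropWhile_cons_of_pos (by simp [hc])]
            have := List.length_dropWhile_le (fun x => decide (x ≠ '{')) cs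
            simp at this ⊢; omega
          rw [goA_run c cs hc hpost, tokensB_some _ _ _ hm, List.map_cons,
              ih _ (by simp at hs hlt ⊢; omega), hhead]

theorem goA_eq (s : List Char) :
    goA s = (tokensB s).map (fun t => (String.ofList t, labelB t)) :=
  goA_eq_aux s.length s le_rfl

-- ===== VERDICT (by name: the statement is the Claim_ definition above) =====
theorem splitPreservingTags_spec : Claim_equal_splitPreservingTags := by
  intro text _
  show goA text.toList = _
  exact goA_eq text.toList
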